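-- pv_equiv track=rewrite | github.com/Wisleyv/net_tma | scripts/convert_inputs.py | _paragraphs_from_lines
-- ===== SOURCE A (Python) =====
-- from typing import Iterable
--
-- def _paragraphs_from_lines(lines: Iterable[str]) -> list[str]:
--     paragraphs: list[str] = []
--     buffer: list[str] = []
--     for line in lines:
--         if not line.strip():
--             if buffer:
--                 paragraphs.append(" ".join(buffer))
--                 buffer = []
--             continue
--         buffer.append(line.strip())
--     if buffer:
--         paragraphs.append(" ".join(buffer))
--     return paragraphs
-- ===== SOURCE B (Python) =====
-- def _paragraphs_from_lines(lines):
--     stripped = [line.strip() for line in lines]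
--     paragraphs = []
--     i, n = 0, len(stripped)
--     while i < n:
--         if not stripped[i]:
--             i += 1
--             continue
--         j = i
--         while j < n and stripped[j]:
--             j += 1
--         paragraphs.append(" ".join(stripped[i:j]))
--         i = j
--     return paragraphs
-- ===== Notes on version B (the rewrite author's own statement) =====
-- stated objective: alternative
-- what changed: B strips all lines up front and segments the result by scanning maximal runs of non-blank lines with an index/inner-while (run extraction), instead of A's one-pass state machine with a mutable buffer and a trailing flush.
import Mathlib
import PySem

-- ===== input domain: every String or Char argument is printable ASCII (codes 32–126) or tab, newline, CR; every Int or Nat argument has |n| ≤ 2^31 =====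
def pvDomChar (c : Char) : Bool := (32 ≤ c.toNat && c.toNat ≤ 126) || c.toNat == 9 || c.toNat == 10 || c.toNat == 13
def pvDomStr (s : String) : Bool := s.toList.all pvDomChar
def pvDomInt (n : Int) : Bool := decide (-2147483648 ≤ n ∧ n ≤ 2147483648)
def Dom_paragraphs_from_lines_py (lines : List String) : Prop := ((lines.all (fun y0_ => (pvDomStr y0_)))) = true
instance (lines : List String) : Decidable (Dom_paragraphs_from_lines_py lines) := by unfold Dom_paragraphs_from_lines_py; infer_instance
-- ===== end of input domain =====

-- B strips all lines first and extracts maximal non-blank runs by scanning, instead of A's buffer/flush state machine: an alternative decomposition, same cost.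

-- ===== PORT A =====
-- loop body of A's for-loop (state = (paragraphs, buffer)) and the trailing flush
def pvStepA (st : List String × List String) (line : String) : List String × List String :=
  let s := PySem.Str.strip line
  if s = "" then
    if st.2 ≠ [] then (st.1 ++ [PySem.Str.join " " st.2], ([] : List String)) else st
  else (st.1, st.2 ++ [s])

def pvFinA (st : List String × List String) : List String :=
  if st.2 ≠ [] then st.1 ++ [PySem.Str.join " " st.2] else st.1

def paragraphs_from_lines_py (lines : List String) : List String :=
  pvFinA (lines.foldl pvStepA ([], []))

-- ===== PORT B =====
-- outer while loop of Source B: skip a blank entry, or take the maximal non-blank run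
def pvGoB : List String → List String
  | [] => []
  | s :: rest =>
    if s = "" then pvGoB rest
    else PySem.Str.join " " (s :: rest.takeWhile (· ≠ "")) :: pvGoB (rest.dropWhile (· ≠ ""))
termination_by l => l.length
decreasing_by
  · simp
  · simpa using Nat.lt_succ_of_le (List.length_dropWhile_le _ _)

def paragraphs_from_lines_py_alt (lines : List String) : List String :=
  pvGoB (lines.map PySem.Str.strip)

-- ===== PRECONDITION & SPEC =====
def Spec_paragraphs_from_lines_py (lines : List String) (out : List String) : Prop := out = paragraphs_from_lines_py_alt lines
instance (lines : List String) (out : List String) : Decidable (Spec_paragraphs_from_lines_py lines out) := by unfold Spec_paragraphs_from_lines_py; infer_instance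

-- ===== CLAIM (what is proved, stated in full; the proofs are below) =====
def Claim_equal_paragraphs_from_lines_py : Prop := ∀ (lines : List String), Dom_paragraphs_from_lines_py lines → Spec_paragraphs_from_lines_py lines (paragraphs_from_lines_py lines)

-- ===== LEMMAS AND PROOFS =====

-- proof-side characterisation of A's loop: pending buffer + remaining (already stripped) lines
def pvF : List String → List String → List String
  | buf, [] => if buf = [] then [] else [PySem.Str.join " " buf]
  | buf, s :: rest =>
    if s = "" then
      (if buf = [] then pvF [] rest else PySem.Str.join " " buf :: pvF [] rest)
    else pvF (buf ++ [s]) rest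

theorem pvF_foldA (lines : List String) : ∀ (ps buf : List String),
    pvFinA (lines.foldl pvStepA (ps, buf)) = ps ++ pvF buf (lines.map PySem.Str.strip) := by
  induction lines with
  | nil =>
    intro ps buf
    by_cases h : buf = [] <;> simp [pvFinA, pvF, h]
  | cons line rest ih =>
    intro ps buf
    rw [List.foldl_cons, List.map_cons]
    by_cases hs : PySem.Str.strip line = ""
    · by_cases hb : buf = []
      · have := ih ps buf
        simp only [pvStepA, hs, hb, pvF] at this ⊢
        simpa using this
      · have := ih (ps ++ [PySem.Str.join " " buf]) []
        simp only [pvStepA, hs, hb, pvF, if_true, if_false, ne_eq, not_false_eq_true, if_pos] at this ⊢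
        simpa [List.append_assoc] using this
    · have := ih ps (buf ++ [PySem.Str.strip line])
      simp only [pvStepA, hs, pvF] at this ⊢
      simpa using this
theorem pvF_spec (l : List String) :
    (pvF [] l = pvGoB l) ∧
    ∀ buf, buf ≠ [] →
      pvF buf l = PySem.Str.join " " (buf ++ l.takeWhile (· ≠ "")) :: pvGoB (l.dropWhile (· ≠ "")) := by
  induction l with
  | nil =>
    refine ⟨by simp [pvF, pvGoB], ?_⟩
    intro buf hb
    simp [pvF, pvGoB, hb]
  | cons s rest ih =>
    by_cases hs : s = ""
    · refine ⟨?_, ?_⟩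
      · simp [pvF, pvGoB, hs, ih.1]
      · intro buf hb
        simp [pvF, pvGoB, hs, hb, ih.1]
    · refine ⟨?_, ?_⟩
      · have := ih.2 [s] (by simp)
        simp only [pvF, hs, ite_false]
        simpa [pvGoB, hs] using this
      · intro buf hb
        have := ih.2 (buf ++ [s]) (by simp)
        simp only [pvF, hs, ite_false]
        simpa [pvGoB, hs, List.takeWhile, List.dropWhile] using this

-- ===== VERDICT (by name: the statement is the Claim_ definition above) =====
theorem paragraphs_from_lines_py_spec : Claim_equal_paragraphs_from_lines_py := by
  intro lines _
  unfold Spec_paragraphs_from_lines_py paragraphs_from_lines_py paragraphs_from_lines_py_alt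
  simpa using (pvF_foldA lines [] []).trans (by simp [(pvF_spec (lines.map PySem.Str.strip)).1])
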